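-- pv_equiv track=rewrite | github.com/tyleruploads/montykit | montykit/ciphers.py | bacon_cipher
-- ===== SOURCE A (Python) =====
-- def bacon_cipher(text: str) -> str:
--     """Encodes text using the Baconian cipher (5-bit binary substitution).
--
--     Parameters
--     ----------
--     text : str
--         The input string to encode
--
--     Returns
--     -------
--     str
--         The Baconian encoded string
--     """
--     BACON_DICT = {
--         'A': 'aaaaa', 'B': 'aaaab', 'C': 'aaaba', 'D': 'aaabb', 'E': 'aabaa',
--         'F': 'aabab', 'G': 'aabba', 'H': 'aabbb', 'I': 'abaaa', 'J': 'abaaa',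
--         'K': 'abaab', 'L': 'ababa', 'M': 'ababb', 'N': 'abbaa', 'O': 'abbab',
--         'P': 'abbba', 'Q': 'abbbb', 'R': 'baaaa', 'S': 'baaab', 'T': 'baaba',
--         'U': 'baabb', 'V': 'baabb', 'W': 'babaa', 'X': 'babab', 'Y': 'babba',
--         'Z': 'babbb'
--     }
--     return "".join(BACON_DICT.get(char.upper(), "") if char.isalpha() else char for char in text)
-- ===== SOURCE B (Python) =====
-- def bacon_cipher(text: str) -> str:
--     """Baconian cipher via arithmetic on the collapsed (I=J, U=V) alphabet index
--     instead of a 26-entry lookup table."""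
--     out = []
--     for ch in text:
--         if ch.isalpha():
--             u = ch.upper()
--             if len(u) == 1 and 'A' <= u <= 'Z':
--                 n = ord(u) - 65 - (u >= 'J') - (u >= 'V')
--                 out.append(''.join('b' if (n >> k) & 1 else 'a' for k in range(4, -1, -1)))
--             else:
--                 out.append('')
--         else:
--             out.append(ch)
--     return ''.join(out)
-- ===== Notes on version B (the rewrite author's own statement) =====
-- stated objective: idiomatic
-- what changed: Replaces the 26-entry lookup table with arithmetic: the collapsed (I=J, U=V) alphabet index is computed from the character code and rendered as five bits mapped to the two cipher letters.
import Mathlib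
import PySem

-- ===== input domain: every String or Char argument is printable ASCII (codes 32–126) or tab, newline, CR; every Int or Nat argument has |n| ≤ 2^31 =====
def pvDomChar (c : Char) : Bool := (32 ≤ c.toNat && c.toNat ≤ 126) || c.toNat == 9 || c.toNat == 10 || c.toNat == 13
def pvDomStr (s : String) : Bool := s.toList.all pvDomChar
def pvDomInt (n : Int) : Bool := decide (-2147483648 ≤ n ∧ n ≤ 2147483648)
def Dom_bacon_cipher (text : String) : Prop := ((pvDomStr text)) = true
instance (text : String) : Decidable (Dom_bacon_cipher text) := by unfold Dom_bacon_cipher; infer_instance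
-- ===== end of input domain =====

-- B replaces A's 26-entry Baconian lookup table with arithmetic on the collapsed
-- (I=J, U=V) alphabet index rendered as 5 bits; same O(n) cost, more idiomatic.


-- ===== PORT A =====
-- the literal BACON_DICT of A, in insertion order
def baconDict : PySem.Dict String String := PySem.Dict.ofList
  [("A", "aaaaa"), ("B", "aaaab"), ("C", "aaaba"), ("D", "aaabb"), ("E", "aabaa"),
   ("F", "aabab"), ("G", "aabba"), ("H", "aabbb"), ("I", "abaaa"), ("J", "abaaa"),
   ("K", "abaab"), ("L", "ababa"), ("M", "ababb"), ("N", "abbaa"), ("O", "abbab"),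
   ("P", "abbba"), ("Q", "abbbb"), ("R", "baaaa"), ("S", "baaab"), ("T", "baaba"),
   ("U", "baabb"), ("V", "baabb"), ("W", "babaa"), ("X", "babab"), ("Y", "babba"),
   ("Z", "babbb")]

-- BACON_DICT.get(char.upper(), "") if char.isalpha() else char
def baconEncA (c : Char) : String :=
  if PySem.Chars.isalpha c then baconDict.getD (String.ofList [PySem.Chars.upperChar c]) ""
  else String.ofList [c]

def bacon_cipher (text : String) : String :=
  String.join (text.toList.map baconEncA)

-- ===== PORT B =====
-- per-char arithmetic encoder of Source B
def baconEncB (c : Char) : String :=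
  if PySem.Chars.isalpha c then
    let u := PySem.Chars.upperChar c
    if 'A' ≤ u ∧ u ≤ 'Z' then
      let n : Nat := u.toNat - 65 - (if 'J' ≤ u then 1 else 0) - (if 'V' ≤ u then 1 else 0)
      String.ofList ([4, 3, 2, 1, 0].map (fun k => if (n >>> k) % 2 = 1 then 'b' else 'a'))
    else ""
  else String.ofList [c]

def bacon_cipher_alt (text : String) : String :=
  String.join (text.toList.map baconEncB)

-- ===== PRECONDITION & SPEC =====
def Spec_bacon_cipher (text : String) (out : String) : Prop := out = bacon_cipher_alt text
instance (text : String) (out : String) : Decidable (Spec_bacon_cipher text out) := by unfold Spec_bacon_cipher; infer_instance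

-- ===== CLAIM (what is proved, stated in full; the proofs are below) =====
def Claim_equal_bacon_cipher : Prop := ∀ (text : String), Dom_bacon_cipher text → Spec_bacon_cipher text (bacon_cipher text)

-- ===== LEMMAS AND PROOFS =====
-- per-character agreement on all chars with code ≤ 126 (covers Dom's range), by exhaustive evaluation
set_option maxRecDepth 4000 in
theorem baconEnc_agree_fin : ∀ n : Fin 127, baconEncA (Char.ofNat n) = baconEncB (Char.ofNat n) := by decide

theorem baconEnc_agree (c : Char) (h : pvDomChar c = true) : baconEncA c = baconEncB c := by
  have hle : c.toNat ≤ 126 := by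
    simp only [pvDomChar, Bool.or_eq_true, Bool.and_eq_true, decide_eq_true_eq, beq_iff_eq] at h
    omega
  have := baconEnc_agree_fin ⟨c.toNat, by omega⟩
  simpa [Char.ofNat_toNat] using this

-- ===== VERDICT (by name: the statement is the Claim_ definition above) =====
theorem bacon_cipher_spec : Claim_equal_bacon_cipher := by
  intro text hdom
  unfold Spec_bacon_cipher bacon_cipher bacon_cipher_alt
  congr 1
  apply List.map_congr_left
  intro c hc
  exact baconEnc_agree c (by
    have := (List.all_eq_true.mp hdom) c hc
    simpa using this)
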